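-- pv_equiv track=rewrite | github.com/cuongmpdev/datamining | backend/algorithms/reduct.py | positive_region
-- ===== SOURCE A (Python) =====
-- from typing import Any, Dict, List, Tuple, Set
--
-- def get_equivalence_classes(rows: List[Dict[str, Any]], attrs: List[str]) -> List[List[int]]:
--     if not attrs:
--         return [[i] for i in range(len(rows))]
--
--     groups: Dict[Tuple[Any, ...], List[int]] = {}
--     for idx, row in enumerate(rows):
--         key = tuple(row[a] for a in attrs)
--         groups.setdefault(key, []).append(idx)
--
--     return list(groups.values())
--
-- def positive_region(rows: List[Dict[str, Any]], cond_attrs: List[str], decision_attr: str) -> Set[int]: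
--     pos: Set[int] = set()
--     if not cond_attrs:
--         return pos
--
--     eq_classes = get_equivalence_classes(rows, cond_attrs)
--     for class_indices in eq_classes:
--         decisions = set(rows[i][decision_attr] for i in class_indices)
--         if len(decisions) == 1:  # Consistent decision
--             pos.update(class_indices)
--
--     return pos
-- ===== SOURCE B (Python) =====
-- from typing import Any, Dict, List, Set
--
--
-- def positive_region(rows: List[Dict[str, Any]], cond_attrs: List[str], decision_attr: str) -> Set[int]:
--     pos: Set[int] = set()
--     if not cond_attrs:
--         return pos
--     # No dict/hash grouping at all: recursive partition refinement on a worklist.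
--     # Repeatedly take the first remaining row's key, split the worklist into that
--     # whole equivalence class and the rest, and accept the class if every decision
--     # in it equals the first one.
--     pending = [(i, tuple(row[a] for a in cond_attrs), row[decision_attr])
--                for i, row in enumerate(rows)]
--     while pending:
--         first = pending[0]
--         same = [t for t in pending if t[1] == first[1]]
--         pending = [t for t in pending if t[1] != first[1]]
--         if all(t[2] == first[2] for t in same):
--             pos.update(t[0] for t in same)
--     return pos
-- ===== Notes on version B (the rewrite author's own statement) =====
-- stated objective: alternative
-- what changed: B drops the hash-grouping dict entirely: it builds one worklist of (index, key, decision) triples and does recursive partition refinement, repeatedly splitting off the first triple's whole equivalence class by list filtering and accepting it when every decision in the class equals the first one.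
import Mathlib
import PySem

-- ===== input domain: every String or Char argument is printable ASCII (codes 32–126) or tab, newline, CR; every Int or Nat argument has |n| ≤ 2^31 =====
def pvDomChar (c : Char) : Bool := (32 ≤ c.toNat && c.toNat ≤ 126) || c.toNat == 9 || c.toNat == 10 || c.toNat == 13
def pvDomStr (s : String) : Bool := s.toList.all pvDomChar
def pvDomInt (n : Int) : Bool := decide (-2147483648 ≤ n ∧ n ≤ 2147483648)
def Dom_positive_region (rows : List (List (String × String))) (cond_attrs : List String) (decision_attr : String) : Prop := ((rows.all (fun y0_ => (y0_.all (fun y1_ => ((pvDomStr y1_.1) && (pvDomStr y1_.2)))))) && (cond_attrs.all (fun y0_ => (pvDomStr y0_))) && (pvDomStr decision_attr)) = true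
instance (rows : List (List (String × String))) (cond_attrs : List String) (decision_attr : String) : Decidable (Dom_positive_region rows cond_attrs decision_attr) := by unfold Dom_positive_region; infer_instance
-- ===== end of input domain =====

-- B replaces A's hash-grouping + per-class rescan by a dict-free recursive partition refinement over a worklist of (index, key, decision) triples; same return value, proved equal on Pre_.


-- ===== PORT A =====
-- rows[i] is ported as (pyGet? rows i).getD []: the indices come from enumerate, so pyGet? is always some there (exact).
def get_equivalence_classes (rows : List (List (String × String))) (attrs : List String) : List (List Int) :=
  if attrs = [] then
    (PySem.List.pyRange 0 (PySem.List.len rows) 1).map (fun i => [i])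
  else
    ((PySem.List.enumerate rows).foldl
      (fun d p => PySem.Dict.modify d (attrs.map (fun a => PySem.Dict.getD ⟨p.2⟩ a "")) [] (· ++ [p.1]))
      PySem.Dict.empty).values

def positive_region (rows : List (List (String × String))) (cond_attrs : List String) (decision_attr : String) : List Int :=
  let pos : PySem.Set Int := PySem.Set.empty
  if cond_attrs = [] then pos
  else
    (get_equivalence_classes rows cond_attrs).foldl
      (fun pos cls =>
        if PySem.Set.len (PySem.Set.ofList
            (cls.map (fun i => PySem.Dict.getD ⟨(PySem.List.pyGet? rows i).getD []⟩ decision_attr ""))) = 1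
        then PySem.Set.update pos cls else pos)
      pos

-- ===== PORT B =====
-- the while loop of Source B: split the worklist by the first triple's key, accept the class if all its decisions match the first
def prLoop : List (Int × List String × String) → PySem.Set Int → PySem.Set Int
  | [], pos => pos
  | t :: rest, pos =>
    let same := (t :: rest).filter (fun u => u.2.1 == t.2.1)
    let pending := (t :: rest).filter (fun u => !(u.2.1 == t.2.1))
    prLoop pending
      (if same.all (fun u => u.2.2 == t.2.2) then PySem.Set.update pos (same.map (·.1)) else pos)
  termination_by l _ => l.length
  decreasing_by
    simp only [List.filter_cons, beq_self_eq_true, Bool.not_true, List.length_cons]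
    exact Nat.lt_succ_of_le (List.length_filter_le _ _)

def positive_region_alt (rows : List (List (String × String))) (cond_attrs : List String) (decision_attr : String) : List Int :=
  let pos : PySem.Set Int := PySem.Set.empty
  if cond_attrs = [] then pos
  else
    prLoop
      ((PySem.List.enumerate rows).map
        (fun p => (p.1, cond_attrs.map (fun a => PySem.Dict.getD ⟨p.2⟩ a ""),
                   PySem.Dict.getD ⟨p.2⟩ decision_attr "")))
      pos

-- ===== PRECONDITION & SPEC =====
-- Pre_ excludes exactly the inputs where Python A raises KeyError: some row missing a condition
-- attribute or the decision attribute (only reachable when cond_attrs is nonempty).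
def Pre_positive_region (rows : List (List (String × String))) (cond_attrs : List String) (decision_attr : String) : Prop :=
  cond_attrs = [] ∨
    ∀ row ∈ rows,
      (∀ a ∈ cond_attrs, (PySem.Dict.get? (⟨row⟩ : PySem.Dict String String) a).isSome = true) ∧
      (PySem.Dict.get? (⟨row⟩ : PySem.Dict String String) decision_attr).isSome = true
instance (rows : List (List (String × String))) (cond_attrs : List String) (decision_attr : String) : Decidable (Pre_positive_region rows cond_attrs decision_attr) := by unfold Pre_positive_region; infer_instance

def pvWitness_positive_region : (List (List (String × String))) × List String × String :=
  ([[("a", "1"), ("d", "x")], [("a", "1"), ("d", "y")], [("a", "2"), ("d", "x")]], (["a"], "d"))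

def Spec_positive_region (rows : List (List (String × String))) (cond_attrs : List String) (decision_attr : String) (out : List Int) : Prop := out = positive_region_alt rows cond_attrs decision_attr
instance (rows : List (List (String × String))) (cond_attrs : List String) (decision_attr : String) (out : List Int) : Decidable (Spec_positive_region rows cond_attrs decision_attr out) := by unfold Spec_positive_region; infer_instance

-- ===== CLAIM (what is proved, stated in full; the proofs are below) =====
def Claim_equal_positive_region : Prop := ∀ (rows : List (List (String × String))) (cond_attrs : List String) (decision_attr : String), Dom_positive_region rows cond_attrs decision_attr → Pre_positive_region rows cond_attrs decision_attr → Spec_positive_region rows cond_attrs decision_attr (positive_region rows cond_attrs decision_attr)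

-- ===== LEMMAS AND PROOFS =====

def keyOf (ca : List String) (row : List (String × String)) : List String :=
  ca.map (fun a => PySem.Dict.getD ⟨row⟩ a "")

def decOf (da : String) (row : List (String × String)) : String :=
  PySem.Dict.getD ⟨row⟩ da ""

-- the per-key step both programs implement, stated on the triple list
def classStep (L : List (Int × List String × String)) (pos : PySem.Set Int) (k : List String) :
    PySem.Set Int :=
  match L.filter (fun u => u.2.1 == k) with
  | [] => pos
  | q :: t =>
    if (q :: t).all (fun u => u.2.2 == q.2.2) then PySem.Set.update pos ((q :: t).map (·.1)) else pos

lemma set_add_mem {α : Type} [BEq α] [LawfulBEq α] (s : PySem.Set α) (x : α) (h : x ∈ s) :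
    PySem.Set.add s x = s := by
  simp [PySem.Set.add, PySem.Set.contains, h]

lemma update_filter_out {α : Type} [BEq α] [LawfulBEq α] (l : List α) (k : α) :
    ∀ (s : PySem.Set α), k ∈ s →
      PySem.Set.update s (l.filter (fun x => !(x == k))) = PySem.Set.update s l := by
  induction l with
  | nil => intro s _; rfl
  | cons x t ih =>
    intro s hk
    by_cases hx : x = k
    · subst hx
      simp only [List.filter_cons, beq_self_eq_true, Bool.not_true]
      simp only [PySem.Set.update, List.foldl_cons] at *
      rw [set_add_mem s x hk]
      exact ih s hk
    · have hb : (!(x == k)) = true := by simp [hx]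
      simp only [List.filter_cons, hb, if_pos]
      simp only [PySem.Set.update, List.foldl_cons] at *
      exact ih (PySem.Set.add s x) ((PySem.Set.mem_add s x k).mpr (Or.inl hk))

lemma update_cons_of_not_mem {α : Type} [BEq α] [LawfulBEq α] (l : List α) (k : α)
    (h : ∀ x ∈ l, x ≠ k) :
    ∀ (s : PySem.Set α), PySem.Set.update (k :: s) l = k :: PySem.Set.update s l := by
  induction l with
  | nil => intro s; rfl
  | cons x t ih =>
    intro s
    have hx : x ≠ k := h x (by simp)
    simp only [PySem.Set.update, List.foldl_cons] at *
    have hadd : PySem.Set.add (k :: s) x = k :: PySem.Set.add s x := by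
      by_cases hm : x ∈ s
      · simp [PySem.Set.add, PySem.Set.contains, hm, hx]
      · simp [PySem.Set.add, PySem.Set.contains, hm, hx]
    rw [hadd]
    exact ih (fun y hy => h y (by simp [hy])) (PySem.Set.add s x)

lemma ofList_cons_eq {α : Type} [BEq α] [LawfulBEq α] (k : α) (ks : List α) :
    PySem.Set.ofList (k :: ks) =
      k :: PySem.Set.ofList (ks.filter (fun x => !(x == k))) := by
  have h3 : ∀ x ∈ ks.filter (fun x => !(x == k)), x ≠ k := by
    intro x hx
    have := (List.mem_filter.mp hx).2
    simpa using this
  have e1 : PySem.Set.ofList (k :: ks) = PySem.Set.update [k] ks := by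
    rw [PySem.Set.ofList_eq_foldl]; rfl
  have e3 : PySem.Set.update ([] : PySem.Set α) (ks.filter (fun x => !(x == k))) =
      PySem.Set.ofList (ks.filter (fun x => !(x == k))) := by
    rw [PySem.Set.ofList_eq_foldl]; rfl
  rw [e1, ← update_filter_out ks k [k] (by simp), update_cons_of_not_mem _ k h3 [], e3]

-- B's loop computes the fold of classStep over the first-occurrence key list
lemma prLoop_eq_fold :
    ∀ (n : Nat) (L : List (Int × List String × String)) (pos : PySem.Set Int),
      L.length ≤ n →
      prLoop L pos = (PySem.Set.ofList (L.map (·.2.1))).foldl (classStep L) pos := by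
  intro n
  induction n with
  | zero =>
    intro L pos hl
    have : L = [] := List.eq_nil_of_length_eq_zero (Nat.le_zero.mp hl)
    subst this
    rw [prLoop]
    simp [PySem.Set.ofList_eq_foldl]
  | succ n ih =>
    intro L pos hl
    match L with
    | [] =>
      rw [prLoop]
      simp [PySem.Set.ofList_eq_foldl]
    | t :: rest =>
      have hsame : (t :: rest).filter (fun u => u.2.1 == t.2.1) =
          t :: rest.filter (fun u => u.2.1 == t.2.1) := by
        simp
      have hpend : (t :: rest).filter (fun u => !(u.2.1 == t.2.1)) =
          rest.filter (fun u => !(u.2.1 == t.2.1)) := by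
        simp
      set pending := rest.filter (fun u => !(u.2.1 == t.2.1)) with hpdef
      have hlen : pending.length ≤ n := by
        have h := List.length_filter_le (fun u => !(u.2.1 == t.2.1)) rest
        simp only [List.length_cons] at hl
        rw [hpdef]
        omega
      -- unfold one step of prLoop
      rw [prLoop, hpend, hsame]
      set pos' := (if (t :: rest.filter (fun u => u.2.1 == t.2.1)).all (fun u => u.2.2 == t.2.2)
        then PySem.Set.update pos ((t :: rest.filter (fun u => u.2.1 == t.2.1)).map (·.1)) else pos)
        with hpos'
      -- key list: head key first, then the deduped remaining keys
      have hkeys : PySem.Set.ofList ((t :: rest).map (·.2.1)) =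
          t.2.1 :: PySem.Set.ofList ((rest.map (·.2.1)).filter (fun x => !(x == t.2.1))) := by
        simp only [List.map_cons]
        exact ofList_cons_eq t.2.1 (rest.map (·.2.1))
      have hpk : pending.map (·.2.1) = (rest.map (·.2.1)).filter (fun x => !(x == t.2.1)) := by
        rw [hpdef, List.filter_map]
        rfl
      -- first step of the RHS fold is exactly pos'
      have hstep0 : classStep (t :: rest) pos t.2.1 = pos' := by
        unfold classStep
        rw [hsame]
      rw [hkeys, List.foldl_cons, hstep0, ← hpk]
      rw [ih pending pos' hlen]
      apply PySem.List.foldl_congr_mem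
      intro acc k hk
      have hkmem : k ∈ pending.map (·.2.1) := by
        have : k ∈ PySem.Set.ofList (pending.map (·.2.1)) := hk
        exact (PySem.Set.mem_ofList _ _).mp this
      obtain ⟨u, hu, huk⟩ := List.mem_map.mp hkmem
      have hune : (u.2.1 == t.2.1) = false := by
        have := (List.mem_filter.mp hu).2
        simpa using this
    -- k ≠ t.2.1, so filtering (t :: rest) by key k ignores the removed class
      have hkne : k ≠ t.2.1 := by
        intro h; rw [← huk] at h; rw [h] at hune; simp at hune
      unfold classStep
      have hhead : (t.2.1 == k) = false := beq_eq_false_iff_ne.mpr (fun e => hkne e.symm)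
      have hff : (t :: rest).filter (fun u => u.2.1 == k) =
          (rest.filter (fun u => !(u.2.1 == t.2.1))).filter (fun u => u.2.1 == k) := by
        rw [List.filter_filter]
        simp only [List.filter_cons, hhead, Bool.false_eq_true, if_neg, not_false_iff]
        apply List.filter_congr
        intro u _
        by_cases h : u.2.1 = k
        · simp [h, beq_eq_false_iff_ne.mpr hkne]
        · simp [beq_eq_false_iff_ne.mpr h]
      rw [hff]

-- ===== A-side lemmas (as before) =====

-- len(set(y :: t)) == 1  iff every element of t equals y
lemma update_singleton_of_all (y : String) (t : List String) (h : t.all (· == y) = true) :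
    PySem.Set.update [y] t = [y] := by
  induction t with
  | nil => rfl
  | cons x t ih =>
    simp only [List.all_cons, Bool.and_eq_true, beq_iff_eq] at h
    obtain ⟨hx, ht⟩ := h
    subst hx
    simp only [PySem.Set.update, List.foldl_cons] at *
    have : PySem.Set.add [x] x = [x] := by simp [PySem.Set.add, PySem.Set.contains]
    rw [this]
    exact ih (by simpa using ht)

lemma set_len_one_iff (y : String) (t : List String) :
    PySem.Set.len (PySem.Set.ofList (y :: t)) = 1 ↔ t.all (· == y) = true := by
  have hup : PySem.Set.ofList (y :: t) = PySem.Set.update [y] t := by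
    rw [PySem.Set.ofList_eq_foldl]
    simp only [List.foldl_cons]
    rfl
  constructor
  · intro h
    rw [List.all_eq_true]
    intro x hx
    have hlen : (PySem.Set.ofList (y :: t)).length = 1 := by
      have : ((PySem.Set.ofList (y :: t)).length : Int) = 1 := h
      exact_mod_cast this
    obtain ⟨a, ha⟩ := List.length_eq_one_iff.mp hlen
    have hy : y ∈ PySem.Set.ofList (y :: t) := (PySem.Set.mem_ofList _ _).mpr (by simp)
    have hxm : x ∈ PySem.Set.ofList (y :: t) := (PySem.Set.mem_ofList _ _).mpr (by simp [hx])
    rw [ha] at hy hxm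
    simp only [List.mem_singleton] at hy hxm
    simp [hxm, hy]
  · intro h
    rw [hup, update_singleton_of_all y t h]
    rfl

-- every pair of enumerate rows 0 satisfies rows[p.1] = p.2
lemma enumerate_pyGet (rows : List (List (String × String))) (p : Int × List (String × String))
    (hp : p ∈ PySem.List.enumerate rows 0) :
    (PySem.List.pyGet? rows p.1).getD [] = p.2 := by
  rw [PySem.List.mem_enumerate_iff] at hp
  obtain ⟨k, hk, rfl⟩ := hp
  simp [PySem.List.pyGet?_natCast, List.getElem?_eq_getElem hk]

theorem positive_region_spec : Claim_equal_positive_region := by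
  intro rows cond_attrs decision_attr _hdom _hpre
  unfold Spec_positive_region
  by_cases hc : cond_attrs = []
  · simp [positive_region, positive_region_alt, hc]
  · unfold positive_region positive_region_alt get_equivalence_classes
    simp only [if_neg hc]
    set ps := PySem.List.enumerate rows 0 with hps
    set L := ps.map (fun p => (p.1, keyOf cond_attrs p.2, decOf decision_attr p.2)) with hL
    -- A's groups dict
    set groups := ps.foldl
      (fun d p => PySem.Dict.modify d (cond_attrs.map (fun a => PySem.Dict.getD ⟨p.2⟩ a "")) [] (· ++ [p.1]))
      PySem.Dict.empty with hgroups
    have hgk : groups.keys = PySem.Set.update [] (ps.map (fun p => keyOf cond_attrs p.2)) := by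
      rw [hgroups]
      exact PySem.Dict.keys_foldl_modify_key ps (fun p => keyOf cond_attrs p.2) []
        (fun _ p => (· ++ [p.1])) PySem.Dict.empty
    have hgnd : groups.keys.Nodup := by
      rw [hgroups]
      exact PySem.Dict.nodup_keys_foldl_modify_key ps _ [] _ _ (by simp)
    -- rewrite A's fold over values as a fold over keys
    rw [PySem.Dict.values_eq_map_keys groups hgnd [], hgk, List.foldl_map]
    have hupof : PySem.Set.update ([] : PySem.Set (List String))
        (ps.map (fun p => keyOf cond_attrs p.2)) =
        PySem.Set.ofList (ps.map (fun p => keyOf cond_attrs p.2)) := by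
      rw [PySem.Set.ofList_eq_foldl]; rfl
    have hLkeys : L.map (·.2.1) = ps.map (fun p => keyOf cond_attrs p.2) := by
      rw [hL, List.map_map]; rfl
    rw [hupof]
    -- B's loop is the classStep fold over the same key list
    have hB : prLoop L PySem.Set.empty =
        (PySem.Set.ofList (L.map (·.2.1))).foldl (classStep L) PySem.Set.empty :=
      prLoop_eq_fold L.length L PySem.Set.empty (le_refl _)
    have hLe : (PySem.List.enumerate rows).map
        (fun p => (p.1, cond_attrs.map (fun a => PySem.Dict.getD ⟨p.2⟩ a ""),
                   PySem.Dict.getD ⟨p.2⟩ decision_attr "")) = L := by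
      rw [hL]; rfl
    rw [hLe, hB, hLkeys]
    -- both folds agree key by key
    apply PySem.List.foldl_congr_mem
    intro acc k hk
    have hkmem : k ∈ ps.map (fun p => keyOf cond_attrs p.2) :=
      (PySem.Set.mem_ofList _ _).mp hk
    have hfne : ps.filter (fun p => keyOf cond_attrs p.2 == k) ≠ [] := by
      rw [List.mem_map] at hkmem
      obtain ⟨p, hp, hpk⟩ := hkmem
      intro hnil
      have : p ∈ ps.filter (fun p => keyOf cond_attrs p.2 == k) :=
        List.mem_filter.mpr ⟨hp, by simp [hpk]⟩
      simp [hnil] at this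
    obtain ⟨q, t, hqt⟩ := List.exists_cons_of_ne_nil hfne
    -- A's class for k via the grouping lemma
    have hgv : groups.getD k [] = (ps.filter (fun p => keyOf cond_attrs p.2 == k)).map (·.1) := by
      have hfold : groups = (ps.map (fun p => (keyOf cond_attrs p.2, p.1))).foldl
          (fun d q => PySem.Dict.modify d q.1 [] (· ++ [q.2])) PySem.Dict.empty := by
        rw [List.foldl_map, hgroups]
        rfl
      rw [hfold, PySem.Dict.getD_foldl_modify_append]
      rw [List.filter_map]
      simp only [List.map_map]
      rfl
    -- B's class for k is the same rows' triples
    have hLf : L.filter (fun u => u.2.1 == k) =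
        (ps.filter (fun p => keyOf cond_attrs p.2 == k)).map
          (fun p => (p.1, keyOf cond_attrs p.2, decOf decision_attr p.2)) := by
      rw [hL, List.filter_map]
      rfl
    have hmemps : ∀ p ∈ q :: t, p ∈ ps := by
      intro p hp
      rw [← hqt] at hp
      exact (List.mem_filter.mp hp).1
    -- A's per-class decision list equals the stored decisions
    have hdecs : ((q :: t).map (·.1)).map
          (fun i => PySem.Dict.getD ⟨(PySem.List.pyGet? rows i).getD []⟩ decision_attr "") =
        (q :: t).map (fun p => decOf decision_attr p.2) := by
      rw [List.map_map]
      apply List.map_congr_left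
      intro p hp
      have h2 := enumerate_pyGet rows p (hmemps p hp)
      simp only [Function.comp_apply, decOf, h2]
    have hgvk : groups.getD k [] = (q :: t).map (·.1) := by rw [hgv, hqt]
    unfold classStep
    rw [hLf, hqt, List.map_cons, hgvk, hdecs]
    simp only [List.map_cons, List.all_cons, beq_self_eq_true, Bool.true_and]
    by_cases hcons : (t.map (fun p => (p.1, keyOf cond_attrs p.2, decOf decision_attr p.2))).all
        (fun u => u.2.2 == decOf decision_attr q.2) = true
    · have hall : t.all (fun p => decOf decision_attr p.2 == decOf decision_attr q.2) = true := by
        rwa [List.all_map] at hcons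
      have hlen : PySem.Set.len (PySem.Set.ofList
          (decOf decision_attr q.2 :: t.map (fun p => decOf decision_attr p.2))) = 1 := by
        refine (set_len_one_iff _ _).mpr ?_
        rw [List.all_map]
        exact hall
      rw [if_pos hlen, if_pos hcons]
      simp [List.map_map]
      rfl
    · have hall : ¬ t.all (fun p => decOf decision_attr p.2 == decOf decision_attr q.2) = true := by
        intro h; apply hcons; rwa [List.all_map]
      have hlen : ¬ PySem.Set.len (PySem.Set.ofList
          (decOf decision_attr q.2 :: t.map (fun p => decOf decision_attr p.2))) = 1 := by
        intro h
        apply hall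
        have := (set_len_one_iff _ _).mp h
        rwa [List.all_map] at this
      rw [if_neg hlen, if_neg (by simpa using hcons)]
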